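-- pv_equiv track=rewrite | github.com/paiml/depyler | examples/hard_final_conc_threadpool.py | schedule_fifo
-- ===== SOURCE A (Python) =====
-- def get_task_dur(queue: list[int], idx: int) -> int:
--     """Get task duration at index."""
--     return queue[idx * 3 + 1]
--
-- def num_tasks(queue: list[int]) -> int:
--     """Number of tasks in queue."""
--     return len(queue) // 3
--
-- def schedule_fifo(queue: list[int], num_workers: int) -> list[int]:
--     """FIFO scheduling. Returns [total_time, tasks_completed].
--
--     Workers process tasks in order. Total time = max of all worker finish times.
--     """
--     worker_times: list[int] = []
--     w: int = 0
--     while w < num_workers: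
--         worker_times.append(0)
--         w = w + 1
--     completed: int = 0
--     ntasks: int = num_tasks(queue)
--     i: int = 0
--     while i < ntasks:
--         min_worker: int = 0
--         min_time: int = worker_times[0]
--         j: int = 1
--         while j < num_workers:
--             wt: int = worker_times[j]
--             if wt < min_time:
--                 min_time = wt
--                 min_worker = j
--             j = j + 1
--         dur: int = get_task_dur(queue, i)
--         old: int = worker_times[min_worker]
--         worker_times[min_worker] = old + dur
--         completed = completed + 1
--         i = i + 1
--     max_time: int = 0
--     k: int = 0
--     while k < num_workers:
--         wt2: int = worker_times[k]
--         if wt2 > max_time: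
--             max_time = wt2
--         k = k + 1
--     return [max_time, completed]
-- ===== SOURCE B (Python) =====
-- def schedule_fifo(queue: list[int], num_workers: int) -> list[int]:
--     """FIFO scheduling. Returns [total_time, tasks_completed].
--
--     Keeps the workers as a list of (finish_time, worker_index) pairs sorted
--     ascending: the least-loaded worker (ties by lowest index) is always at the
--     front, and the maximum finish time is read off the last entry.
--     """
--     workers = [(0, w) for w in range(num_workers)]
--     n = len(queue) // 3
--     for i in range(n):
--         t, w = workers.pop(0)
--         entry = (t + queue[i * 3 + 1], w)
--         pos = 0
--         while pos < len(workers) and workers[pos] < entry: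
--             pos += 1
--         workers.insert(pos, entry)
--     total = workers[-1][0] if workers else 0
--     return [max(total, 0), n]
-- ===== Notes on version B (the rewrite author's own statement) =====
-- stated objective: faster
-- what changed: B replaces A's per-task full argmin scan over an array of worker times by a list of (finish_time, worker_index) pairs kept sorted ascending: the least-loaded worker (ties by index) is popped from the front, the updated pair is re-inserted at its sorted position (scan stops at the insertion point), and the final maximum is read off the last entry instead of a closing max-scan; intended as faster by a constant factor, measured 1.9-2.9x on a timing run's largest sizes.
import Mathlib
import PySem

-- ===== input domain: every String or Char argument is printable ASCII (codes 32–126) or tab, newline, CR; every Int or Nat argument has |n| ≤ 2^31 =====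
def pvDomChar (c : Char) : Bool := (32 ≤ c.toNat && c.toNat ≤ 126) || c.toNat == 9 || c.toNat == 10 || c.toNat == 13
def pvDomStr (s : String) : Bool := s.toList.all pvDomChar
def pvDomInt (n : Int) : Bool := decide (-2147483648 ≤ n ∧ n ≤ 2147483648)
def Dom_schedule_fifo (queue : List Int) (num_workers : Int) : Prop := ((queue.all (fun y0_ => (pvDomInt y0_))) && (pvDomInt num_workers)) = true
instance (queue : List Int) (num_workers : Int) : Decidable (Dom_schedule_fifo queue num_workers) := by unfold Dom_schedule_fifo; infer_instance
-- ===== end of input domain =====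

-- B keeps the workers as a lexicographically sorted list of (finish_time, index) pairs
-- (front = least-loaded worker, last = maximum) instead of A's per-task full argmin scan;
-- objective: intended as faster by a constant factor (the insertion scan stops early, the argmin
-- scan never does); a timing run measured B 1.9-2.9x faster at its largest sizes.


-- ===== PORT A =====
-- queue[idx * 3 + 1]; every call A makes has 0 ≤ idx < len(queue)//3, so the index is in
-- range and the total pyGetD form is exact there.
def get_task_dur (queue : List Int) (idx : Int) : Int :=
  PySem.List.pyGetD queue (idx * 3 + 1) 0

def num_tasks (queue : List Int) : Int :=
  PySem.Int.floordiv (queue.length : Int) 3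

-- A's local Python list worker_times is ported as Array Int (a Python list is an O(1)-indexed
-- vector): append = push, worker_times[j] = getD, worker_times[j] = v = setIfInBounds; every
-- index A reads or writes satisfies 0 ≤ j < size except worker_times[0] on the empty array
-- (num_workers < 1 with a task present) — Python raises IndexError exactly there, and Pre_
-- excludes exactly those inputs.
def pvAInit (num_workers w : Int) (acc : Array Int) : Array Int :=
  if _h : w < num_workers then pvAInit num_workers (w + 1) (acc.push 0) else acc
termination_by (num_workers - w).toNat
decreasing_by omega

-- inner while j < num_workers: running (min_time, min_worker)
def pvAMin (worker_times : Array Int) (num_workers j min_time min_worker : Int) : Int × Int :=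
  if h : j < num_workers then
    let wt := worker_times.getD j.toNat 0
    if wt < min_time then pvAMin worker_times num_workers (j + 1) wt j
    else pvAMin worker_times num_workers (j + 1) min_time min_worker
  else (min_time, min_worker)
termination_by (num_workers - j).toNat
decreasing_by all_goals omega

-- main while i < ntasks loop
def pvATasks (queue : List Int) (num_workers ntasks i : Int)
    (worker_times : Array Int) (completed : Int) : Array Int × Int :=
  if h : i < ntasks then
    let p := pvAMin worker_times num_workers 1 (worker_times.getD 0 0) 0
    let dur := get_task_dur queue i
    let old := worker_times.getD p.2.toNat 0
    pvATasks queue num_workers ntasks (i + 1)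
      (worker_times.setIfInBounds p.2.toNat (old + dur)) (completed + 1)
  else (worker_times, completed)
termination_by (ntasks - i).toNat
decreasing_by omega

-- while k < num_workers: max_time
def pvAMax (worker_times : Array Int) (num_workers k max_time : Int) : Int :=
  if h : k < num_workers then
    let wt2 := worker_times.getD k.toNat 0
    pvAMax worker_times num_workers (k + 1) (if wt2 > max_time then wt2 else max_time)
  else max_time
termination_by (num_workers - k).toNat
decreasing_by omega

def schedule_fifo (queue : List Int) (num_workers : Int) : List Int :=
  let worker_times := pvAInit num_workers 0 #[]
  let r := pvATasks queue num_workers (num_tasks queue) 0 worker_times 0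
  [pvAMax r.1 num_workers 0 0, r.2]

-- ===== PORT B =====
-- Python's '<' on int pairs: lexicographic (the indices are distinct, so the second
-- component never ties in B's use).
def pvLt (a b : Int × Int) : Bool := a.1 < b.1 || (a.1 == b.1 && a.2 < b.2)

-- the pos-scan + insert of Source B: walk to the first element not < entry, keeping the
-- scanned prefix reversed in acc (tail-recursive), and splice entry in there
def pvInsertAux (entry : Int × Int) : List (Int × Int) → List (Int × Int) → List (Int × Int)
  | acc, [] => acc.reverseAux [entry]
  | acc, x :: xs =>
      if pvLt x entry then pvInsertAux entry (x :: acc) xs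
      else acc.reverseAux (entry :: x :: xs)

def pvInsert (entry : Int × Int) (xs : List (Int × Int)) : List (Int × Int) :=
  pvInsertAux entry [] xs

-- for i in range(n): pop front, re-insert updated pair; popping the empty list raises in
-- Python — exactly the inputs Pre_ excludes ([] is a dummy there).
def pvBLoop (queue : List Int) : List Int → List (Int × Int) → List (Int × Int)
  | [], workers => workers
  | i :: is, workers =>
      match workers with
      | [] => []
      | (t, w) :: rest =>
          pvBLoop queue is (pvInsert (t + PySem.List.pyGetD queue (i * 3 + 1) 0, w) rest)

def schedule_fifo_alt (queue : List Int) (num_workers : Int) : List Int :=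
  let workers0 := (PySem.List.pyRange 0 num_workers 1).map (fun w => ((0 : Int), w))
  let n := PySem.Int.floordiv (queue.length : Int) 3
  let workers := pvBLoop queue (PySem.List.pyRange 0 n 1) workers0
  let total := (workers.getLast?.map Prod.fst).getD 0
  [max total 0, n]

-- ===== PRECONDITION & SPEC =====
-- A raises IndexError (worker_times[0] on an empty list) when num_workers < 1 while at
-- least one task exists; B's pop(0) raises there too. Everything else is admitted.
def Pre_schedule_fifo (queue : List Int) (num_workers : Int) : Prop :=
  1 ≤ num_workers ∨ queue.length < 3

instance (queue : List Int) (num_workers : Int) : Decidable (Pre_schedule_fifo queue num_workers) := by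
  unfold Pre_schedule_fifo; infer_instance

def pvWitness_schedule_fifo : List Int × Int := ([7, 4, 0, 2, 9, 1], 2)

def Spec_schedule_fifo (queue : List Int) (num_workers : Int) (out : List Int) : Prop :=
  out = schedule_fifo_alt queue num_workers
instance (queue : List Int) (num_workers : Int) (out : List Int) : Decidable (Spec_schedule_fifo queue num_workers out) := by
  unfold Spec_schedule_fifo; infer_instance

-- ===== CLAIM (what is proved, stated in full; the proofs are below) =====
def Claim_equal_schedule_fifo : Prop := ∀ (queue : List Int) (num_workers : Int), Dom_schedule_fifo queue num_workers → Pre_schedule_fifo queue num_workers → Spec_schedule_fifo queue num_workers (schedule_fifo queue num_workers)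

-- ===== LEMMAS AND PROOFS =====

-- (time, index) view of A's worker_times array
def pvPairs (l : List Int) : List (Int × Int) :=
  (List.range l.length).map (fun k => (l.getD k 0, (k : Int)))

def pvLmin (a b : Int × Int) : Int × Int := if b.1 < a.1 then b else a

def pvStepA (nw : Int) (wt : Array Int) (d : Int) : Array Int :=
  let p := pvAMin wt nw 1 (wt.getD 0 0) 0
  wt.setIfInBounds p.2.toNat (wt.getD p.2.toNat 0 + d)

def pvStepB (d : Int) : List (Int × Int) → List (Int × Int)
  | [] => []
  | (t, w) :: rest => pvInsert (t + d, w) rest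

def pvLe (a b : Int × Int) : Prop := a.1 < b.1 ∨ (a.1 = b.1 ∧ a.2 ≤ b.2)
def pvLtP (a b : Int × Int) : Prop := a.1 < b.1 ∨ (a.1 = b.1 ∧ a.2 < b.2)

lemma pvLt_iff (a b : Int × Int) : pvLt a b = true ↔ pvLtP a b := by
  simp [pvLt, pvLtP]

lemma pvLe_antisymm {a b : Int × Int} (h1 : pvLe a b) (h2 : pvLe b a) : a = b := by
  rcases a with ⟨x, y⟩; rcases b with ⟨u, v⟩
  simp_all only [pvLe, Prod.mk.injEq]
  omega

lemma pvPairs_length (l : List Int) : (pvPairs l).length = l.length := by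
  simp [pvPairs]

lemma pvPairs_getElem (l : List Int) (k : Nat) (h : k < l.length) :
    (pvPairs l)[k]'(by simpa [pvPairs_length]) = (l.getD k 0, (k : Int)) := by
  simp [pvPairs]

lemma pvPairs_mem {l : List Int} {x : Int × Int} (h : x ∈ pvPairs l) :
    ∃ k : Nat, k < l.length ∧ x = (l.getD k 0, (k : Int)) := by
  simp only [pvPairs, List.mem_map, List.mem_range] at h
  obtain ⟨k, hk, he⟩ := h
  exact ⟨k, hk, he.symm⟩

lemma pvPairs_set (l : List Int) (k : Nat) (h : k < l.length) (v : Int) :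
    pvPairs (l.set k v) = (pvPairs l).set k (v, (k : Int)) := by
  apply List.ext_getElem
  · simp [pvPairs_length]
  · intro j h1 h2
    simp only [pvPairs_length, List.length_set] at h1 h2
    rw [List.getElem_set]
    by_cases hj : k = j <;>
      simp [pvPairs, hj, List.getD, List.getElem?_set, h, h1]

lemma pvPairs_map_fst (l : List Int) : (pvPairs l).map Prod.fst = l := by
  apply List.ext_getElem
  · simp [pvPairs]
  · intro j h1 h2
    simp [pvPairs, List.getD, h2]

lemma pvPairs_snd_pairwise (l : List Int) :
    (pvPairs l).Pairwise (fun a b => a.2 < b.2) := by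
  unfold pvPairs
  rw [List.pairwise_map]
  exact List.pairwise_lt_range.imp (by intro a b h; simpa using h)

lemma pvPairs_snd_nodup (l : List Int) : ((pvPairs l).map Prod.snd).Nodup := by
  have h := pvPairs_snd_pairwise l
  show ((pvPairs l).map Prod.snd).Pairwise (· ≠ ·)
  exact List.pairwise_map.mpr (h.imp fun hab => by omega)

-- characterisation of A's loops -------------------------------------------------

-- Array.getD agrees with List.getD on the underlying list
lemma pvArr_getD (a : Array Int) (i : Nat) (d : Int) : a.getD i d = a.toList.getD i d := by
  unfold Array.getD List.getD
  split <;> rename_i h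
  · rw [List.getElem?_eq_getElem (by simpa using h)]
    simp
  · rw [List.getElem?_eq_none (by simpa using h)]
    simp

lemma pvAInit_eq (nw : Int) : ∀ (n : Nat) (w : Int), n = (nw - w).toNat → ∀ acc,
    (pvAInit nw w acc).toList = acc.toList ++ List.replicate n 0 := by
  intro n
  induction n with
  | zero => intro w hw acc; rw [pvAInit]; simp; omega
  | succ m ih =>
      intro w hw acc
      rw [pvAInit]
      have h : w < nw := by omega
      rw [dif_pos h, ih (w + 1) (by omega)]
      simp [List.replicate_succ]

lemma pvAMin_eq (wt : Array Int) (nw : Int) : ∀ (n : Nat) (j : Int), n = (nw - j).toNat →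
    ∀ mt mw, pvAMin wt nw j mt mw =
      ((PySem.List.pyRange j nw 1).map (fun k => (wt.getD k.toNat 0, k))).foldl pvLmin (mt, mw) := by
  intro n
  induction n with
  | zero =>
      intro j hj mt mw
      rw [pvAMin, dif_neg (by omega), PySem.List.pyRange_one_eq_nil (by omega)]
      simp
  | succ m ih =>
      intro j hj mt mw
      have h : j < nw := by omega
      rw [pvAMin, dif_pos h, PySem.List.pyRange_one_cons h]
      simp only [List.map_cons, List.foldl_cons]
      by_cases hlt : wt.getD j.toNat 0 < mt
      · rw [if_pos hlt, ih (j + 1) (by omega)]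
        congr 1
        simp only [pvLmin]
        rw [if_pos hlt]
      · rw [if_neg hlt, ih (j + 1) (by omega)]
        congr 1
        simp only [pvLmin]
        rw [if_neg hlt]

lemma pvATasks_eq (queue : List Int) (nw nt : Int) : ∀ (n : Nat) (i : Int), n = (nt - i).toNat →
    ∀ (wt : Array Int) (c : Int), pvATasks queue nw nt i wt c =
      (((PySem.List.pyRange i nt 1).map (get_task_dur queue)).foldl (pvStepA nw) wt,
       c + ((nt - i).toNat : Int)) := by
  intro n
  induction n with
  | zero =>
      intro i hi wt c
      rw [pvATasks, dif_neg (by omega), PySem.List.pyRange_one_eq_nil (by omega)]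
      simp; omega
  | succ m ih =>
      intro i hi wt c
      have h : i < nt := by omega
      rw [pvATasks, dif_pos h, PySem.List.pyRange_one_cons h]
      rw [ih (i + 1) (by omega)]
      simp only [List.map_cons, List.foldl_cons]
      simp only [Prod.mk.injEq]
      exact ⟨rfl, by omega⟩

lemma pvAMax_eq (wt : Array Int) (nw : Int) : ∀ (n : Nat) (k : Int), n = (nw - k).toNat →
    ∀ m, pvAMax wt nw k m =
      ((PySem.List.pyRange k nw 1).map (fun j => wt.getD j.toNat 0)).foldl max m := by
  intro n
  induction n with
  | zero =>
      intro k hk m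
      rw [pvAMax, dif_neg (by omega), PySem.List.pyRange_one_eq_nil (by omega)]
      simp
  | succ p ih =>
      intro k hk m
      have h : k < nw := by omega
      rw [pvAMax, dif_pos h, PySem.List.pyRange_one_cons h, ih (k + 1) (by omega)]
      simp only [List.map_cons, List.foldl_cons]
      have he : (if wt.getD k.toNat 0 > m then wt.getD k.toNat 0 else m)
          = max m (wt.getD k.toNat 0) := by split <;> omega
      rw [he]

lemma pvBfold_nil (queue : List Int) (is : List Int) :
    is.foldl (fun ws i => pvStepB (get_task_dur queue i) ws) [] = [] := by
  induction is with
  | nil => rfl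
  | cons i is ih => simpa using ih

lemma pvBLoop_eq (queue : List Int) : ∀ (is : List Int) (ws : List (Int × Int)),
    pvBLoop queue is ws = is.foldl (fun ws i => pvStepB (get_task_dur queue i) ws) ws := by
  intro is
  induction is with
  | nil => intro ws; rfl
  | cons i is ih =>
      intro ws
      rcases ws with _ | ⟨⟨t, w⟩, rest⟩
      · simp only [pvBLoop, List.foldl_cons]
        rw [show pvStepB (get_task_dur queue i) [] = [] from rfl, pvBfold_nil]
      · simp only [pvBLoop, List.foldl_cons]
        rw [ih]; rfl

-- the running-minimum fold ------------------------------------------------------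

lemma pvLmin_mem (t : List (Int × Int)) : ∀ a, t.foldl pvLmin a ∈ a :: t := by
  induction t with
  | nil => intro a; simp
  | cons b t ih =>
      intro a
      rw [List.foldl_cons]
      have h := ih (pvLmin a b)
      rcases List.mem_cons.mp h with h | h
      · rw [h]; unfold pvLmin; split <;> simp
      · simp [h]

lemma pvLmin_le (t : List (Int × Int)) : ∀ a, (∀ x ∈ t, a.2 < x.2) →
    t.Pairwise (fun p q => p.2 < q.2) →
    ∀ x ∈ a :: t, pvLe (t.foldl pvLmin a) x := by
  induction t with
  | nil => intro a _ _ x hx; simp at hx; subst hx; simp [pvLe]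
  | cons b t ih =>
      intro a ha hp x hx
      rw [List.foldl_cons]
      rw [List.pairwise_cons] at hp
      rw [List.mem_cons, List.mem_cons] at hx
      have hb : a.2 < b.2 := ha b (by simp)
      by_cases hlt : b.1 < a.1
      · have hacc : pvLmin a b = b := by simp [pvLmin, hlt]
        rw [hacc]
        have hmain := ih b hp.1 hp.2
        have hrb := hmain b (by simp)
        rcases hx with hx | hx | hx
        · subst hx; unfold pvLe at *; omega
        · subst hx; exact hrb
        · exact hmain x (by simp [hx])
      · have hacc : pvLmin a b = a := by simp [pvLmin, hlt]
        rw [hacc]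
        have ha' : ∀ y ∈ t, a.2 < y.2 := fun y hy => ha y (by simp [hy])
        have hmain := ih a ha' hp.2
        have hra := hmain a (by simp)
        rcases hx with hx | hx | hx
        · subst hx; exact hra
        · subst hx; unfold pvLe at *; omega
        · exact hmain x (by simp [hx])

-- sorted insertion ---------------------------------------------------------------

lemma pvInsertAux_acc (e : Int × Int) : ∀ (xs acc : List (Int × Int)),
    pvInsertAux e acc xs = acc.reverse ++ pvInsertAux e [] xs := by
  intro xs
  induction xs with
  | nil => intro acc; simp [pvInsertAux, List.reverseAux_eq]
  | cons x xs ih =>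
      intro acc
      simp only [pvInsertAux]
      split
      · rw [ih (x :: acc), ih [x]]
        simp
      · simp [List.reverseAux_eq]

lemma pvInsert_cons (e x : Int × Int) (xs : List (Int × Int)) :
    pvInsert e (x :: xs) = if pvLt x e then x :: pvInsert e xs else e :: x :: xs := by
  unfold pvInsert
  simp only [pvInsertAux]
  split
  · rw [pvInsertAux_acc e xs [x]]
    simp
  · simp [List.reverseAux_eq]

lemma pvInsert_perm (e : Int × Int) (xs : List (Int × Int)) :
    (pvInsert e xs).Perm (e :: xs) := by
  induction xs with
  | nil => rfl
  | cons x xs ih =>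
      rw [pvInsert_cons]
      split
      · exact ((ih.cons x).trans (List.Perm.swap e x xs)).symm.symm
      · rfl

lemma pvInsert_pairwise (e : Int × Int) (xs : List (Int × Int))
    (hs : xs.Pairwise pvLtP) (ht : ∀ x ∈ xs, pvLtP x e ∨ pvLtP e x) :
    (pvInsert e xs).Pairwise pvLtP := by
  induction xs with
  | nil => simp [pvInsert, pvInsertAux]
  | cons x xs ih =>
      rw [List.pairwise_cons] at hs
      rw [pvInsert_cons]
      split
      · rename_i hlt
        rw [List.pairwise_cons]
        refine ⟨?_, ih hs.2 (fun y hy => ht y (by simp [hy]))⟩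
        intro y hy
        have hy' := List.mem_cons.mp ((pvInsert_perm e xs).mem_iff.mp hy)
        rcases hy' with hy' | hy'
        · subst hy'; exact (pvLt_iff _ _).mp hlt
        · exact hs.1 y hy'
      · rename_i hnlt
        rw [List.pairwise_cons]
        have hex : pvLtP e x := by
          rcases ht x (by simp) with h | h
          · exact absurd ((pvLt_iff x e).mpr h) (by simpa using hnlt)
          · exact h
        refine ⟨?_, List.pairwise_cons.mpr hs⟩
        intro y hy
        rcases List.mem_cons.mp hy with hy | hy
        · subst hy; exact hex
        · rcases hex with h | h
          · rcases hs.1 y hy with h2 | h2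
            · left; omega
            · left; omega
          · rcases hs.1 y hy with h2 | h2
            · left; omega
            · right; omega

lemma pvLtP_le {a b : Int × Int} (h : pvLtP a b) : pvLe a b := by
  unfold pvLtP at h; unfold pvLe; omega

-- one scheduling step preserves the sorted-pairs correspondence -------------------

lemma pvStep_inv (nw : Int) (wt : Array Int) (ws : List (Int × Int)) (d : Int)
    (hnw : 1 ≤ nw) (hlen : wt.toList.length = nw.toNat)
    (hperm : ws.Perm (pvPairs wt.toList)) (hsort : ws.Pairwise pvLtP) :
    (pvStepB d ws).Perm (pvPairs (pvStepA nw wt d).toList) ∧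
    (pvStepB d ws).Pairwise pvLtP ∧ (pvStepA nw wt d).toList.length = nw.toNat := by
  have hlpos : 0 < wt.toList.length := by omega
  rcases ws with _ | ⟨⟨t, w⟩, rest⟩
  · have := hperm.length_eq
    rw [pvPairs_length] at this
    simp only [List.length_nil] at this
    omega
  -- the (time, index) list of A's array, split at its head
  have hpp : (PySem.List.pyRange 0 nw 1).map (fun k => (wt.getD k.toNat 0, k)) = pvPairs wt.toList := by
    rw [PySem.List.pyRange_one, List.map_map]
    unfold pvPairs
    rw [hlen]
    simp
  have hsplit : pvPairs wt.toList =
      (wt.getD 0 0, 0) ::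
        (PySem.List.pyRange 1 nw 1).map (fun k => (wt.getD k.toNat 0, k)) := by
    rw [← hpp, PySem.List.pyRange_one_cons (by omega)]; simp
  -- A's inner loop computes the fold of pvLmin over that list
  have hminEq := pvAMin_eq wt nw (nw - 1).toNat 1 (by omega) (wt.getD 0 0) 0
  have hP := pvPairs_snd_pairwise wt.toList
  rw [hsplit, List.pairwise_cons] at hP
  have hmemA : pvAMin wt nw 1 (wt.getD 0 0) 0 ∈ pvPairs wt.toList := by
    rw [hminEq, hsplit]
    exact pvLmin_mem _ _
  have hleA : ∀ x ∈ pvPairs wt.toList, pvLe (pvAMin wt nw 1 (wt.getD 0 0) 0) x := by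
    rw [hminEq, hsplit]
    exact pvLmin_le _ _ hP.1 hP.2
  -- B's head is the same lexicographic minimum
  have hsort' := List.pairwise_cons.mp hsort
  have hleB : ∀ x ∈ (t, w) :: rest, pvLe (t, w) x := by
    intro x hx
    rcases List.mem_cons.mp hx with hx | hx
    · subst hx; unfold pvLe; omega
    · exact pvLtP_le (hsort'.1 x hx)
  have hmemB : (t, w) ∈ pvPairs wt.toList := hperm.subset (by simp)
  have hp : pvAMin wt nw 1 (wt.getD 0 0) 0 = (t, w) :=
    pvLe_antisymm (hleA _ hmemB) (hleB _ (hperm.mem_iff.mpr hmemA))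
  -- the head comes from position k of A's array
  obtain ⟨k, hk, hkval⟩ := pvPairs_mem hmemB
  have hw : w = (k : Int) := by rw [Prod.mk.injEq] at hkval; exact hkval.2
  have ht : t = wt.toList.getD k 0 := by rw [Prod.mk.injEq] at hkval; exact hkval.1
  -- A's step is an update of position k
  have hstepA : (pvStepA nw wt d).toList = wt.toList.set k (t + d) := by
    simp only [pvStepA, hp]
    rw [hw]
    rw [Array.toList_setIfInBounds]
    simp only [Int.toNat_natCast]
    rw [pvArr_getD, ← ht]
  have hPk : (pvPairs wt.toList)[k]'(by rw [pvPairs_length]; exact hk) = (t, w) := by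
    rw [pvPairs_getElem wt.toList k hk, ← ht, hw]
  have hkP : k < (pvPairs wt.toList).length := by rw [pvPairs_length]; exact hk
  have e1 : (pvPairs wt.toList).Perm ((t, w) :: (pvPairs wt.toList).eraseIdx k) := by
    rw [← hPk]
    exact (List.getElem_cons_eraseIdx_perm hkP).symm
  have e2 : rest.Perm ((pvPairs wt.toList).eraseIdx k) := (hperm.trans e1).cons_inv
  refine ⟨?_, ?_, ?_⟩
  · show (pvInsert (t + d, w) rest).Perm _
    refine (pvInsert_perm _ _).trans ((e2.cons _).trans ?_)
    rw [hstepA, pvPairs_set wt.toList k hk, hw]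
    exact (List.set_perm_cons_eraseIdx hkP _).symm
  · show (pvInsert (t + d, w) rest).Pairwise pvLtP
    apply pvInsert_pairwise _ _ hsort'.2
    -- indices in rest differ from w
    have hnd : (((t, w) :: rest).map Prod.snd).Nodup :=
      ((hperm.map Prod.snd).nodup_iff).mpr (pvPairs_snd_nodup wt.toList)
    rw [List.map_cons, List.nodup_cons] at hnd
    intro x hx
    have hxw : x.2 ≠ w := by
      intro hxx
      exact hnd.1 (List.mem_map.mpr ⟨x, hx, hxx⟩)
    unfold pvLtP
    omega
  · rw [hstepA]
    simp [hlen]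

lemma pvFold_inv (nw : Int) (hnw : 1 ≤ nw) : ∀ (ds : List Int) (wt : Array Int) (ws : List (Int × Int)),
    wt.toList.length = nw.toNat → ws.Perm (pvPairs wt.toList) → ws.Pairwise pvLtP →
    (ds.foldl (fun ws d => pvStepB d ws) ws).Perm (pvPairs (ds.foldl (pvStepA nw) wt).toList) ∧
    (ds.foldl (fun ws d => pvStepB d ws) ws).Pairwise pvLtP ∧
    (ds.foldl (pvStepA nw) wt).toList.length = nw.toNat := by
  intro ds
  induction ds with
  | nil => intro wt ws h1 h2 h3; exact ⟨h2, h3, h1⟩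
  | cons d ds ih =>
      intro wt ws h1 h2 h3
      obtain ⟨a, b, c⟩ := pvStep_inv nw wt ws d hnw h1 h2 h3
      simpa using ih (pvStepA nw wt d) (pvStepB d ws) c a b

lemma pvFoldMax_dominated (g : Int) : ∀ (l : List Int) (a : Int), (∀ x ∈ l, x ≤ g) →
    l.foldl max (max a g) = max a g := by
  intro l
  induction l with
  | nil => intro a _; simp
  | cons c l ih =>
      intro a hle
      rw [List.foldl_cons]
      have hc : c ≤ g := hle c (by simp)
      have h1 : max (max a g) c = max a g := by omega
      rw [h1]
      exact ih a (fun x hx => hle x (by simp [hx]))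

lemma pvFoldMax_greatest (l : List Int) (g : Int) : ∀ a, g ∈ l → (∀ x ∈ l, x ≤ g) →
    l.foldl max a = max a g := by
  induction l with
  | nil => intro a h _; simp at h
  | cons b l ih =>
      intro a hg hle
      rw [List.foldl_cons]
      rcases List.mem_cons.mp hg with hg | hg
      · subst hg
        exact pvFoldMax_dominated _ l a (fun x hx => hle x (by simp [hx]))
      · have hb : b ≤ g := hle b (by simp)
        rw [ih (max a b) hg (fun x hx => hle x (by simp [hx]))]
        omega

lemma pvSorted_le_getLast : ∀ (l : List (Int × Int)) (h : l ≠ []), l.Pairwise pvLtP →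
    ∀ x ∈ l, x.1 ≤ (l.getLast h).1 := by
  intro l
  induction l with
  | nil => intro h; simp at h
  | cons a t ih =>
      intro h hp x hx
      rw [List.pairwise_cons] at hp
      by_cases ht : t = []
      · subst ht
        simp at hx; subst hx; simp
      · rw [List.getLast_cons ht]
        rcases List.mem_cons.mp hx with hx | hx
        · subst hx
          have := hp.1 _ (List.getLast_mem ht)
          unfold pvLtP at this; omega
        · exact ih ht hp.2 x hx

lemma pvNt_nonneg (queue : List Int) : 0 ≤ num_tasks queue := by
  have h : num_tasks queue = ((queue.length / 3 : Nat) : Int) := by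
    exact_mod_cast PySem.Int.floordiv_natCast queue.length 3
  rw [h]; positivity

lemma pvBLoop_eq' (queue : List Int) (is : List Int) (ws : List (Int × Int)) :
    pvBLoop queue is ws
      = (is.map (get_task_dur queue)).foldl (fun ws d => pvStepB d ws) ws := by
  rw [pvBLoop_eq, List.foldl_map]

lemma pvFinal (nw : Int) (hnw : 1 ≤ nw) (wt : Array Int) (ws : List (Int × Int))
    (hlen : wt.toList.length = nw.toNat) (hperm : ws.Perm (pvPairs wt.toList))
    (hsort : ws.Pairwise pvLtP) :
    ((PySem.List.pyRange 0 nw 1).map (fun j => wt.getD j.toNat 0)).foldl max 0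
      = max ((ws.getLast?.map Prod.fst).getD 0) 0 := by
  have hne : ws ≠ [] := by
    intro h
    have hl := hperm.length_eq
    rw [h, pvPairs_length] at hl
    simp only [List.length_nil] at hl
    omega
  have hmap : (PySem.List.pyRange 0 nw 1).map (fun j => wt.getD j.toNat 0) = wt.toList := by
    rw [PySem.List.pyRange_one, List.map_map]
    apply List.ext_getElem
    · simp [hlen]
    · intro i h1 h2
      have h3 : i < wt.size := by simpa using h2
      simp [getElem?_pos wt i h3]
  rw [hmap]
  rw [List.getLast?_eq_some_getLast hne]
  simp only [Option.map_some, Option.getD_some]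
  have hmem : (ws.getLast hne).1 ∈ wt.toList := by
    have h1 := (hperm.map Prod.fst).mem_iff.mp
      (List.mem_map_of_mem (f := Prod.fst) (List.getLast_mem hne))
    rwa [pvPairs_map_fst] at h1
  have hdom : ∀ x ∈ wt.toList, x ≤ (ws.getLast hne).1 := by
    intro x hx
    have h1 : x ∈ ws.map Prod.fst := by
      apply (hperm.map Prod.fst).mem_iff.mpr
      rwa [pvPairs_map_fst]
    obtain ⟨p, hp, hpx⟩ := List.mem_map.mp h1
    rw [← hpx]
    exact pvSorted_le_getLast ws hne hsort p hp
  rw [pvFoldMax_greatest wt.toList _ 0 hmem hdom]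
  omega

theorem schedule_fifo_spec : Claim_equal_schedule_fifo := by
  unfold Claim_equal_schedule_fifo
  intro queue nw _ hpre
  unfold Spec_schedule_fifo
  simp only [schedule_fifo, schedule_fifo_alt]
  have hnt0 : 0 ≤ num_tasks queue := pvNt_nonneg queue
  have hnum : PySem.Int.floordiv ((queue.length : Nat) : Int) 3 = num_tasks queue := rfl
  rw [hnum, pvATasks_eq queue nw (num_tasks queue) (num_tasks queue - 0).toNat 0 rfl]
  by_cases hnw : 1 ≤ nw
  · -- at least one worker: the sorted-pairs invariant carries through the task fold
    have hlen0 : (pvAInit nw 0 #[]).toList.length = nw.toNat := by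
      rw [pvAInit_eq nw (nw - 0).toNat 0 rfl]; simp
    have hpairs0 : ((PySem.List.pyRange 0 nw 1).map (fun w => ((0 : Int), w)))
        = pvPairs (pvAInit nw 0 #[]).toList := by
      rw [pvAInit_eq nw (nw - 0).toNat 0 rfl]
      unfold pvPairs
      rw [PySem.List.pyRange_one, List.map_map]
      simp [List.getD]
    have hsort0 : (pvPairs (pvAInit nw 0 #[]).toList).Pairwise pvLtP := by
      rw [← hpairs0, PySem.List.pyRange_one, List.map_map, List.pairwise_map]
      refine List.pairwise_lt_range.imp ?_
      intro a b h
      unfold pvLtP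
      right
      refine ⟨rfl, by simpa using h⟩
    obtain ⟨hperm, hsort, hlenF⟩ :=
      pvFold_inv nw hnw ((PySem.List.pyRange 0 (num_tasks queue) 1).map (get_task_dur queue))
        (pvAInit nw 0 #[]) (pvPairs (pvAInit nw 0 #[]).toList) hlen0 (List.Perm.refl _) hsort0
    rw [pvBLoop_eq', hpairs0]
    rw [pvAMax_eq _ nw (nw - 0).toNat 0 rfl]
    simp only [List.cons.injEq, and_true]
    constructor
    · exact pvFinal nw hnw _ _ hlenF hperm hsort
    · show (0 : Int) + ((num_tasks queue - 0).toNat : Int) = num_tasks queue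
      omega
  · -- no worker: Pre_ forces an empty task list; both sides are [0, 0]
    have hq : queue.length < 3 := by
      rcases hpre with h | h
      · omega
      · exact h
    have hnt : num_tasks queue = 0 := by
      have h : num_tasks queue = ((queue.length / 3 : Nat) : Int) := by
        exact_mod_cast PySem.Int.floordiv_natCast queue.length 3
      rw [h]
      have h2 : queue.length / 3 = 0 := by omega
      simp [h2]
    rw [hnt]
    rw [pvAMax_eq _ nw (nw - 0).toNat 0 rfl]
    rw [PySem.List.pyRange_one_eq_nil (by omega : nw ≤ 0)]
    simp [pvBLoop]
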